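-- pv_equiv track=rewrite | github.com/MrBrantCode/unitest_baseline | mut_generate/mist_train_taco/taco_18186/solution.py | calculate_final_scores
-- ===== SOURCE A (Python) =====
-- def calculate_final_scores(n, cards):
--     """
--     Calculate the final scores for Sereja and Dima after playing the card game.
--
--     Parameters:
--     n (int): The number of cards.
--     cards (list of int): A list of integers representing the values on the cards.
--
--     Returns:
--     tuple: A tuple containing two integers, the first being Sereja's score and the second being Dima's score.
--     """
--     r1 = 0  # Sereja's score
--     r2 = 0  # Dima's score
--     t = 0   # Turn indicator: 0 for Sereja, 1 for Dima
--
--     while len(cards) != 0: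
--         temp = max((cards[0], cards[-1]))
--         i = 0 if temp == cards[0] else len(cards) - 1
--
--         if t == 0:
--             r1 += temp
--             t = 1
--         else:
--             r2 += temp
--             t = 0
--
--         cards.pop(i)
--
--     return r1, r2
-- ===== SOURCE B (Python) =====
-- def calculate_final_scores(n, cards):
--     """Two-pointer scan from both ends; does not mutate cards (A empties it)."""
--     lo, hi = 0, len(cards) - 1
--     sereja = dima = 0
--     sereja_turn = True
--     while lo <= hi:
--         if cards[lo] >= cards[hi]:
--             pick = cards[lo]
--             lo += 1
--         else:
--             pick = cards[hi]
--             hi -= 1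
--         if sereja_turn:
--             sereja += pick
--         else:
--             dima += pick
--         sereja_turn = not sereja_turn
--     return sereja, dima
-- ===== Notes on version B (the rewrite author's own statement) =====
-- stated objective: faster
-- what changed: Replaces the pop-from-either-end loop on a shrinking list (each pop(0) is O(n)) with a two-pointer index scan over the unmodified list; B also does not mutate the input list, while A empties it.
import Mathlib
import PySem

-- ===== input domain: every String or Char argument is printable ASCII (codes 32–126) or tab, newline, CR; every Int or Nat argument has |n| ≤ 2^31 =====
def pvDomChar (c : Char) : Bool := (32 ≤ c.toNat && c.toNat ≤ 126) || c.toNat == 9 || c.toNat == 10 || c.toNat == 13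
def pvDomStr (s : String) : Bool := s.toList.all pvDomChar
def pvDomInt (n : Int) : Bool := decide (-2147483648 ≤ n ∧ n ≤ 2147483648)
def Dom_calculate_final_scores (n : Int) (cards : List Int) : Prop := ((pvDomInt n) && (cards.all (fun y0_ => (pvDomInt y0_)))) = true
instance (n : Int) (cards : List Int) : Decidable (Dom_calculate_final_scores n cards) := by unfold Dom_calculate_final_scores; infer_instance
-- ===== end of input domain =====

-- B replaces A's pop-from-either-end loop (pop(0) is O(n)) with a two-pointer index scan;
-- equivalence is about the RETURN value only: A empties the caller's list, B does not mutate it.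

-- ===== PORT A =====
-- while cards ≠ []: temp = max(cards[0], cards[-1]); pop front if temp == cards[0] else back;
-- add temp to r1/r2 alternately (t = 0 → Sereja).
-- fuel = cards.length makes the while-loop structural; it never runs out on the stated call.
def pvLoopA : Nat → List Int → Int → Int → Int → Int × Int
  | _, [], r1, r2, _ => (r1, r2)
  | 0, _ :: _, r1, r2, _ => (r1, r2)
  | fuel+1, x :: xs, r1, r2, t =>
    let temp := max x ((x :: xs).getLast (by simp))
    let popped := if temp = x then xs else (x :: xs).dropLast
    if t = 0 then pvLoopA fuel popped (r1 + temp) r2 1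
    else pvLoopA fuel popped r1 (r2 + temp) 0

def calculate_final_scores (n : Int) (cards : List Int) : Int × Int :=
  pvLoopA cards.length cards 0 0 0

-- ===== PORT B =====
-- two pointers lo, hi into the fixed list; pick the larger end, alternate turns.
-- fuel = initial window size (cards.length) makes the while-loop structural; each
-- iteration shrinks the window lo..hi by one, so fuel never runs out on the stated call.
def pvLoopB (cards : List Int) : Nat → Int → Int → Int → Int → Bool → Int × Int
  | 0, _, _, s, d, _ => (s, d)
  | fuel+1, lo, hi, s, d, turn =>
    if lo ≤ hi then
      if PySem.List.pyGetD cards lo 0 ≥ PySem.List.pyGetD cards hi 0 then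
        let pick := PySem.List.pyGetD cards lo 0
        if turn then pvLoopB cards fuel (lo + 1) hi (s + pick) d false
        else pvLoopB cards fuel (lo + 1) hi s (d + pick) true
      else
        let pick := PySem.List.pyGetD cards hi 0
        if turn then pvLoopB cards fuel lo (hi - 1) (s + pick) d false
        else pvLoopB cards fuel lo (hi - 1) s (d + pick) true
    else (s, d)

def calculate_final_scores_alt (n : Int) (cards : List Int) : Int × Int :=
  pvLoopB cards cards.length 0 ((cards.length : Int) - 1) 0 0 true

-- ===== PRECONDITION & SPEC =====
def Spec_calculate_final_scores (n : Int) (cards : List Int) (out : Int × Int) : Prop := out = calculate_final_scores_alt n cards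
instance (n : Int) (cards : List Int) (out : Int × Int) : Decidable (Spec_calculate_final_scores n cards out) := by unfold Spec_calculate_final_scores; infer_instance

-- ===== CLAIM (what is proved, stated in full; the proofs are below) =====
def Claim_equal_calculate_final_scores : Prop := ∀ (n : Int) (cards : List Int), Dom_calculate_final_scores n cards → Spec_calculate_final_scores n cards (calculate_final_scores n cards)

-- ===== LEMMAS AND PROOFS =====

lemma pvKey : ∀ (k : Nat) (cards : List Int) (lo hi s d : Int) (turn : Bool),
    0 ≤ lo → hi < (cards.length : Int) → k = (hi + 1 - lo).toNat →
    pvLoopB cards k lo hi s d turn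
      = pvLoopA k ((cards.drop lo.toNat).take k) s d (if turn then 0 else 1) := by
  intro k
  induction k with
  | zero =>
    intro cards lo hi s d turn h0 hlen hk
    simp only [pvLoopB, pvLoopA, List.take_zero]
  | succ k ih =>
    intro cards lo hi s d turn h0 hlen hk
    have hle : lo ≤ hi := by omega
    have h0hi : 0 ≤ hi := by omega
    have hlt : lo.toNat < cards.length := by omega
    have hhil : hi.toNat < cards.length := by omega
    have hlohi : lo.toNat + k = hi.toNat := by omega
    have hsub : (cards.drop lo.toNat).take (k+1)
        = cards[lo.toNat] :: ((cards.drop (lo.toNat+1)).take k) := by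
      rw [List.drop_eq_getElem_cons hlt]; rfl
    have hlen_tail : ((cards.drop (lo.toNat+1)).take k).length = k := by
      simp; omega
    have hlast : ∀ (h : (cards[lo.toNat]'hlt :: ((cards.drop (lo.toNat+1)).take k)) ≠ []),
        (cards[lo.toNat]'hlt :: ((cards.drop (lo.toNat+1)).take k)).getLast h
        = cards[hi.toNat]'hhil := by
      intro h
      cases k with
      | zero =>
        have : lo.toNat = hi.toNat := by omega
        simp [this]
      | succ k' =>
        have ht : ((cards.drop (lo.toNat+1)).take (k'+1)) ≠ [] := by
          intro hc; rw [hc] at hlen_tail; simp at hlen_tail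
        rw [List.getLast_cons ht, List.getLast_eq_getElem]
        simp only [hlen_tail, Nat.add_sub_cancel, List.getElem_take, List.getElem_drop]
        congr 1
        omega
    have hdl : (cards[lo.toNat] :: ((cards.drop (lo.toNat+1)).take k)).dropLast
        = (cards.drop lo.toNat).take k := by
      rw [← hsub, List.dropLast_eq_take]
      have : ((cards.drop lo.toNat).take (k+1)).length = k + 1 := by simp; omega
      rw [this]
      simp [List.take_take]
    have hgl : PySem.List.pyGetD cards lo 0 = cards[lo.toNat] :=
      PySem.List.pyGetD_eq_getElem cards 0 h0 (by omega)
    have hgh : PySem.List.pyGetD cards hi 0 = cards[hi.toNat] :=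
      PySem.List.pyGetD_eq_getElem cards 0 h0hi (by omega)
    have hlo1 : (lo + 1).toNat = lo.toNat + 1 := by omega
    simp only [pvLoopB]
    rw [if_pos hle, hgl, hgh, hsub, pvLoopA]
    rcases le_or_gt (cards[hi.toNat]'hhil) (cards[lo.toNat]'hlt) with hcmp | hcmp
    · cases turn with
      | false =>
        simp only [hlast, max_eq_left hcmp, ge_iff_le, if_pos hcmp, Bool.false_eq_true,
          if_false, one_ne_zero]
        rw [ih cards (lo+1) hi s (d + cards[lo.toNat]) true (by omega) hlen (by omega), hlo1]
        simp
      | true =>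
        simp only [hlast, max_eq_left hcmp, ge_iff_le, if_pos hcmp]
        rw [ih cards (lo+1) hi (s + cards[lo.toNat]) d false (by omega) hlen (by omega), hlo1]
        simp
    · cases turn with
      | false =>
        simp only [hlast, ge_iff_le, if_neg (not_le.mpr hcmp), max_eq_right hcmp.le, hdl]
        rw [ih cards lo (hi-1) s (d + cards[hi.toNat]) true h0 (by omega) (by omega)]
        simp [hcmp.ne']
      | true =>
        simp only [hlast, ge_iff_le, if_neg (not_le.mpr hcmp), max_eq_right hcmp.le, hdl]
        rw [ih cards lo (hi-1) (s + cards[hi.toNat]) d false h0 (by omega) (by omega)]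
        simp [hcmp.ne']

theorem pvMain : ∀ (n : Int) (cards : List Int),
    calculate_final_scores n cards = calculate_final_scores_alt n cards := by
  intro n cards
  unfold calculate_final_scores calculate_final_scores_alt
  rw [pvKey cards.length cards 0 ((cards.length : Int) - 1) 0 0 true (by omega) (by omega) (by omega)]
  simp

-- ===== VERDICT (by name: the statement is the Claim_ definition above) =====
theorem calculate_final_scores_spec : Claim_equal_calculate_final_scores := by
  intro n cards _
  unfold Spec_calculate_final_scores
  exact pvMain n cards
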